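-- pv_equiv track=rewrite | github.com/RobertPod/tietopythontraining-basic_20180727 | students/podsiadly_robert/lesson_02_flow_control/src/modules/replace_within_the_fragment.py | replace_within_the_fragment
-- ===== SOURCE A (Python) =====
-- def replace_within_the_fragment(input_string: str) -> str:
--     len_input_string = len(input_string)
--     count_h = input_string.count('h')
--     if count_h < 3:
--         return input_string
--
--     changed_h = 0
--     output_string: str = ''
--     for i in range(len_input_string):
--         if input_string[i] == 'h':
--             changed_h += 1
--             if changed_h == 1 or changed_h == count_h:
--                 output_string += input_string[i]
--             else:
--                 output_string += 'H'
--         else: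
--             output_string += input_string[i]
--
--     return output_string
-- ===== SOURCE B (Python) =====
-- def replace_within_the_fragment(input_string: str) -> str:
--     if input_string.count('h') < 3:
--         return input_string
--     first = input_string.index('h')
--     last = input_string.rindex('h')
--     return (input_string[:first + 1]
--             + input_string[first + 1:last].replace('h', 'H')
--             + input_string[last:])
-- ===== Notes on version B (the rewrite author's own statement) =====
-- stated objective: simpler
-- what changed: Replaces the per-character loop with its running h-counter by locating the first and last h via index/rindex and doing a slice-level replace on the interior fragment only.
import Mathlib
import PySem

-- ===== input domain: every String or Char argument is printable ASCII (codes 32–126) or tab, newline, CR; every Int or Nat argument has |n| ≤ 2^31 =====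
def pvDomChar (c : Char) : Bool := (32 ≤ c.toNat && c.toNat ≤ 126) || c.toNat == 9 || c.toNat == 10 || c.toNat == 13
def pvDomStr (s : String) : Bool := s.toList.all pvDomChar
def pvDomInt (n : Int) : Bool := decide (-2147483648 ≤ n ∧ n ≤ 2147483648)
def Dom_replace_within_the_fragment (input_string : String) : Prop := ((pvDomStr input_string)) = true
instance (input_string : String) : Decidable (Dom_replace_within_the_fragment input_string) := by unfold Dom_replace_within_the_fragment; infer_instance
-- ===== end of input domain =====

-- B keeps the count<3 guard, then locates the first/last 'h' via index/rindex and replaces only in the interior slice: simpler decomposition, no per-character counter loop.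

-- ===== PORT A =====
def replace_within_the_fragment (input_string : String) : String :=
  let count_h : Nat := PySem.Str.count input_string "h"
  if count_h < 3 then input_string
  else
    -- the Python `for i in range(len)` reads input_string[i] left to right: fold over the chars
    let r := input_string.toList.foldl
      (fun (acc : Nat × List Char) ch =>
        if ch = 'h' then
          let changed := acc.1 + 1
          if changed = 1 ∨ changed = count_h then (changed, acc.2 ++ [ch])
          else (changed, acc.2 ++ ['H'])
        else (acc.1, acc.2 ++ [ch]))
      (0, ([] : List Char))
    String.ofList r.2

-- ===== PORT B =====
def replace_within_the_fragment_alt (input_string : String) : String :=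
  if PySem.Str.count input_string "h" < 3 then input_string
  else
    let first := PySem.Str.find input_string "h"
    let last := PySem.Str.rfind input_string "h"
    PySem.Str.slice input_string none (some (first + 1))
      ++ PySem.Str.replace (PySem.Str.slice input_string (some (first + 1)) (some last)) "h" "H"
      ++ PySem.Str.slice input_string (some last) none

-- ===== PRECONDITION & SPEC =====
def Spec_replace_within_the_fragment (input_string : String) (out : String) : Prop := out = replace_within_the_fragment_alt input_string
instance (input_string : String) (out : String) : Decidable (Spec_replace_within_the_fragment input_string out) := by unfold Spec_replace_within_the_fragment; infer_instance

-- ===== CLAIM (what is proved, stated in full; the proofs are below) =====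
def Claim_equal_replace_within_the_fragment : Prop := ∀ (input_string : String), Dom_replace_within_the_fragment input_string → Spec_replace_within_the_fragment input_string (replace_within_the_fragment input_string)

-- ===== LEMMAS AND PROOFS =====

def pvRepl (c : Char) : Char := if c = 'h' then 'H' else c

/-- A's loop body, named so the fold characterization can be stated once. -/
def pvStep (cnt : Nat) (acc : Nat × List Char) (ch : Char) : Nat × List Char :=
  if ch = 'h' then
    if acc.1 + 1 = 1 ∨ acc.1 + 1 = cnt then (acc.1 + 1, acc.2 ++ [ch])
    else (acc.1 + 1, acc.2 ++ ['H'])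
  else (acc.1, acc.2 ++ [ch])

/-- The output A's loop appends from counter state `c` (total count `cnt`). -/
def pvG (cnt : Nat) : Nat → List Char → List Char
  | _, [] => []
  | c, x :: xs =>
    if x = 'h' then
      (if c + 1 = 1 ∨ c + 1 = cnt then x else 'H') :: pvG cnt (c + 1) xs
    else x :: pvG cnt c xs

lemma pvG_nil (cnt c : Nat) : pvG cnt c [] = [] := rfl

lemma pvG_cons (cnt c : Nat) (x : Char) (xs : List Char) :
    pvG cnt c (x :: xs)
      = if x = 'h' then (if c + 1 = 1 ∨ c + 1 = cnt then x else 'H') :: pvG cnt (c + 1) xs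
        else x :: pvG cnt c xs := rfl

lemma pvFoldA (cnt : Nat) : ∀ (xs : List Char) (c : Nat) (a : List Char),
    xs.foldl (pvStep cnt) (c, a) = (c + xs.count 'h', a ++ pvG cnt c xs) := by
  intro xs
  induction xs with
  | nil => intro c a; simp [pvG]
  | cons x xs ih =>
    intro c a
    rw [List.foldl_cons]
    by_cases hx : x = 'h'
    · subst hx
      by_cases hk : c + 1 = 1 ∨ c + 1 = cnt
      · rw [show pvStep cnt (c, a) 'h' = (c + 1, a ++ ['h']) from by
            unfold pvStep; rw [if_pos rfl, if_pos hk]]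
        rw [ih, pvG_cons, if_pos rfl, if_pos hk]
        refine Prod.ext ?_ ?_
        · simp [List.count_cons]; omega
        · simp
      · rw [show pvStep cnt (c, a) 'h' = (c + 1, a ++ ['H']) from by
            unfold pvStep; rw [if_pos rfl, if_neg hk]]
        rw [ih, pvG_cons, if_pos rfl, if_neg hk]
        refine Prod.ext ?_ ?_
        · simp [List.count_cons]; omega
        · simp
    · rw [show pvStep cnt (c, a) x = (c, a ++ [x]) from by
          unfold pvStep; rw [if_neg hx]]
      rw [ih, pvG_cons, if_neg hx]
      refine Prod.ext ?_ ?_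
      · simp [List.count_cons, hx]
      · simp

lemma pvG_no_h (cnt : Nat) : ∀ (c : Nat) (xs : List Char), 'h' ∉ xs → pvG cnt c xs = xs := by
  intro c xs
  induction xs generalizing c with
  | nil => intro _; rfl
  | cons x xs ih =>
    intro h
    have hx : x ≠ 'h' := by intro hx; exact h (by simp [hx])
    rw [pvG_cons, if_neg hx, ih c (by intro hm; exact h (by simp [hm]))]

lemma pvG_append (cnt : Nat) : ∀ (u v : List Char) (c : Nat),
    pvG cnt c (u ++ v) = pvG cnt c u ++ pvG cnt (c + u.count 'h') v := by
  intro u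
  induction u with
  | nil => intro v c; simp [pvG]
  | cons x xs ih =>
    intro v c
    by_cases hx : x = 'h'
    · subst hx
      rw [List.cons_append, pvG_cons, pvG_cons, if_pos rfl, if_pos rfl, ih]
      rw [show c + List.count 'h' ('h' :: xs) = c + 1 + List.count 'h' xs from by
        simp [List.count_cons]; omega]
      simp
    · rw [List.cons_append, pvG_cons, pvG_cons, if_neg hx, if_neg hx, ih]
      rw [show c + List.count 'h' (x :: xs) = c + List.count 'h' xs from by
        simp [List.count_cons, hx]]
      simp

lemma pvG_mid (cnt : Nat) : ∀ (q : List Char) (c : Nat), 1 ≤ c → c + q.count 'h' < cnt →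
    pvG cnt c q = q.map pvRepl := by
  intro q
  induction q with
  | nil => intro c _ _; simp [pvG]
  | cons x xs ih =>
    intro c h1 h2
    by_cases hx : x = 'h'
    · subst hx
      have hcnt : 1 + List.count 'h' xs + c < cnt := by
        simp [List.count_cons] at h2; omega
      have hne : ¬ (c + 1 = 1 ∨ c + 1 = cnt) := by omega
      rw [pvG_cons, if_pos rfl, if_neg hne, ih (c + 1) (by omega) (by omega)]
      simp [pvRepl]
    · have h2' : c + xs.count 'h' < cnt := by
        simp [List.count_cons, hx] at h2; omega
      rw [pvG_cons, if_neg hx, ih c h1 h2']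
      simp [pvRepl, hx]

lemma pvPrefixOf_h (xs : List Char) : (['h'].isPrefixOf xs) = (xs.head? == some 'h') := by
  cases xs with
  | nil => rfl
  | cons x t => simp [List.isPrefixOf, BEq.comm]

lemma pvCount_go (fuel : Nat) : ∀ (l : List Char) (acc : Nat), l.length ≤ fuel →
    PySem.Chars.count.go ['h'] fuel l acc = acc + l.count 'h' := by
  induction fuel with
  | zero =>
    intro l acc h
    have : l = [] := by cases l <;> simp_all
    subst this; simp [PySem.Chars.count.go]
  | succ fuel ih =>
    intro l acc h
    cases l with
    | nil => simp [PySem.Chars.count.go]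
    | cons x t =>
      have ht : t.length ≤ fuel := by simpa using Nat.lt_succ_iff.mp (by simpa using h)
      by_cases hx : x = 'h'
      · subst hx
        rw [PySem.Chars.count.go]
        simp only [pvPrefixOf_h]
        simp [ih t (acc + 1) ht, List.count_cons]
        omega
      · rw [PySem.Chars.count.go]
        simp only [pvPrefixOf_h]
        simp [hx, ih t acc ht, List.count_cons]

lemma pvCount_char (l : List Char) : PySem.Chars.count l ['h'] = l.count 'h' := by
  simp [PySem.Chars.count, pvCount_go l.length l 0 le_rfl]

lemma pvFind_go (p : List Char) : ∀ (k : Nat) (q : List Char), 'h' ∉ p →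
    PySem.Chars.find.go ['h'] (p ++ 'h' :: q) k = (k + p.length : Int) := by
  induction p with
  | nil =>
    intro k q _
    simp only [List.nil_append]
    rw [PySem.Chars.find.go]
    simp [List.isPrefixOf]
  | cons x t ih =>
    intro k q hp
    have hx : x ≠ 'h' := by intro hx; exact hp (by simp [hx])
    rw [List.cons_append, PySem.Chars.find.go]
    have hpre : (['h'].isPrefixOf (x :: (t ++ 'h' :: q))) = false := by
      simp [pvPrefixOf_h, hx]
    rw [hpre]
    simp only [Bool.false_eq_true, if_false]
    rw [ih (k + 1) q (by intro hm; exact hp (by simp [hm]))]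
    simp only [List.length_cons]
    push_cast; omega

lemma pvRfind_go (s : List Char) (L : Nat) (hL : s[L]? = some 'h')
    (hAbove : ∀ i, L < i → s[i]? ≠ some 'h') :
    ∀ j, L ≤ j → PySem.Chars.rfind.go s ['h'] j = (L : Int) := by
  intro j
  induction j with
  | zero =>
    intro h
    have hL0 : L = 0 := Nat.le_zero.mp h
    subst hL0
    rw [PySem.Chars.rfind.go]
    have hpre : (['h'].isPrefixOf s) = true := by
      rw [pvPrefixOf_h]
      have : s.head? = some 'h' := by rw [← List.head?_drop (i := 0)] at hL; simpa using hL
      simp [this]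
    simp [hpre]
  | succ j ih =>
    intro h
    rw [PySem.Chars.rfind.go]
    by_cases hEq : L = j + 1
    · subst hEq
      have hpre : (['h'].isPrefixOf (s.drop (j + 1))) = true := by
        rw [pvPrefixOf_h, List.head?_drop, hL]; rfl
      simp [hpre]
    · have hlt : L ≤ j := by omega
      have hpre : (['h'].isPrefixOf (s.drop (j + 1))) = false := by
        rw [pvPrefixOf_h, List.head?_drop]
        simpa using hAbove (j + 1) (by omega)
      simp [hpre, ih hlt]

lemma pvReplace_go (fuel : Nat) : ∀ (l acc : List Char), l.length ≤ fuel →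
    PySem.Chars.replace.go ['h'] ['H'] fuel l acc = acc.reverse ++ l.map pvRepl := by
  induction fuel with
  | zero =>
    intro l acc h
    have : l = [] := by cases l <;> simp_all
    subst this; simp [PySem.Chars.replace.go]
  | succ fuel ih =>
    intro l acc h
    cases l with
    | nil => simp [PySem.Chars.replace.go]
    | cons x t =>
      have ht : t.length ≤ fuel := by simpa using Nat.lt_succ_iff.mp (by simpa using h)
      by_cases hx : x = 'h'
      · subst hx
        rw [PySem.Chars.replace.go]
        simp only [pvPrefixOf_h]
        simp [ih t _ ht, pvRepl]
      · rw [PySem.Chars.replace.go]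
        simp only [pvPrefixOf_h]
        simp [hx, ih t _ ht, pvRepl]

lemma pvReplace_char (l : List Char) :
    PySem.Chars.replace l ['h'] ['H'] = l.map pvRepl := by
  simp [PySem.Chars.replace, pvReplace_go l.length l [] le_rfl]

lemma pvExists_first (l : List Char) (h : 'h' ∈ l) :
    ∃ p q, l = p ++ 'h' :: q ∧ 'h' ∉ p := by
  induction l with
  | nil => simp at h
  | cons x t ih =>
    by_cases hx : x = 'h'
    · exact ⟨[], t, by simp [hx], by simp⟩
    · have ht : 'h' ∈ t := by
        rcases List.mem_cons.mp h with h1 | h1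
        · exact absurd h1.symm hx
        · exact h1
      obtain ⟨p, q, hpq, hp⟩ := ih ht
      refine ⟨x :: p, q, by simp [hpq], ?_⟩
      simp [hp]; exact fun hh => hx hh.symm
lemma pvExists_last (l : List Char) (h : 'h' ∈ l) :
    ∃ p q, l = p ++ 'h' :: q ∧ 'h' ∉ q := by
  induction l with
  | nil => simp at h
  | cons x t ih =>
    by_cases ht : 'h' ∈ t
    · obtain ⟨p, q, hpq, hq⟩ := ih ht
      exact ⟨x :: p, q, by simp [hpq], hq⟩
    · have hx : x = 'h' := by
        rcases List.mem_cons.mp h with h1 | h1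
        · exact h1.symm
        · exact absurd h1 ht
      exact ⟨[], t, by simp [hx], ht⟩

lemma pvPortA_eq (s : String) : replace_within_the_fragment s
    = if PySem.Str.count s "h" < 3 then s
      else String.ofList ((s.toList.foldl (pvStep (PySem.Str.count s "h")) (0, ([] : List Char))).2) := rfl

lemma pvPortB_eq (s : String) : replace_within_the_fragment_alt s
    = if PySem.Str.count s "h" < 3 then s
      else PySem.Str.slice s none (some (PySem.Str.find s "h" + 1))
        ++ PySem.Str.replace (PySem.Str.slice s (some (PySem.Str.find s "h" + 1)) (some (PySem.Str.rfind s "h"))) "h" "H"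
        ++ PySem.Str.slice s (some (PySem.Str.rfind s "h")) none := rfl

-- ===== VERDICT (by name: the statement is the Claim_ definition above) =====
theorem replace_within_the_fragment_spec : Claim_equal_replace_within_the_fragment := by
  intro s _
  unfold Spec_replace_within_the_fragment
  rw [pvPortA_eq, pvPortB_eq]
  have hsub : ("h" : String).toList = ['h'] := by decide
  have hcnt : PySem.Str.count s "h" = s.toList.count 'h' := by
    rw [PySem.Str.count_eq, hsub, pvCount_char]
  set l := s.toList with hl
  by_cases hlt : PySem.Str.count s "h" < 3
  · rw [if_pos hlt, if_pos hlt]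
  · rw [if_neg hlt, if_neg hlt]
    have h3 : 3 ≤ l.count 'h' := by omega
    have hmem : 'h' ∈ l := List.count_pos_iff.mp (by omega)
    obtain ⟨p, q, hpq, hp⟩ := pvExists_first l hmem
    have hqmem : 'h' ∈ q := by
      have h2 : 2 ≤ q.count 'h' := by
        have := h3
        rw [hpq] at this
        simp [List.count_append, List.count_cons, List.count_eq_zero_of_not_mem hp] at this
        omega
      exact List.count_pos_iff.mp (by omega)
    obtain ⟨q2, r, hq2r, hr⟩ := pvExists_last q hqmem
    have hdec : l = p ++ 'h' :: (q2 ++ 'h' :: r) := by rw [hpq, hq2r]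
    set cnt := PySem.Str.count s "h" with hc
    have hcnt2 : cnt = q2.count 'h' + 2 := by
      rw [hcnt, hdec]
      simp [List.count_append, List.count_cons, List.count_eq_zero_of_not_mem hp,
            List.count_eq_zero_of_not_mem hr]
    -- A's side
    have hA : (l.foldl (pvStep cnt) (0, ([] : List Char))).2
        = p ++ 'h' :: (q2.map pvRepl ++ 'h' :: r) := by
      rw [pvFoldA]
      simp only [List.nil_append]
      rw [hdec]
      rw [show p ++ 'h' :: (q2 ++ 'h' :: r) = p ++ ['h'] ++ q2 ++ 'h' :: r by simp]
      rw [pvG_append, pvG_append, pvG_append]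
      have hcp : p.count 'h' = 0 := List.count_eq_zero_of_not_mem hp
      rw [pvG_no_h cnt 0 p hp]
      rw [show pvG cnt (0 + p.count 'h') ['h'] = ['h'] from by
        rw [pvG_cons, if_pos rfl]; simp [hcp, pvG_nil]]
      rw [pvG_mid cnt q2 _ (by simp [hcp]) (by simp [hcp, List.count_cons]; omega)]
      rw [show pvG cnt (0 + List.count 'h' (p ++ ['h'] ++ q2)) ('h' :: r) = 'h' :: r from by
        rw [pvG_cons, if_pos rfl,
            if_pos (by simp [List.count_append, hcp]; omega : _ ∨ _)]
        rw [pvG_no_h cnt _ r hr]]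
      simp
    -- B's side ingredients
    have hfirst : PySem.Str.find s "h" = (p.length : Int) := by
      rw [PySem.Str.find_eq, hsub, ← hl, hpq]
      show PySem.Chars.find.go ['h'] (p ++ 'h' :: q) 0 = _
      rw [pvFind_go p 0 q hp]; simp
    have hL : l[(p.length + 1 + q2.length)]? = some 'h' := by
      rw [show l = (p ++ 'h' :: q2) ++ 'h' :: r from by rw [hdec]; simp]
      rw [List.getElem?_append_right (by simp; omega)]
      rw [show p.length + 1 + q2.length - (p ++ 'h' :: q2).length = 0 from by simp; omega]
      rfl
    have hAbove : ∀ i, p.length + 1 + q2.length < i → l[i]? ≠ some 'h' := by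
      intro i hi hbad
      rw [show l = (p ++ 'h' :: q2 ++ ['h']) ++ r from by rw [hdec]; simp] at hbad
      rw [List.getElem?_append_right (by simp; omega)] at hbad
      exact hr (List.mem_of_getElem? hbad)
    have hLlen : p.length + 1 + q2.length ≤ l.length := by
      rw [hdec]; simp; omega
    have hlast : PySem.Str.rfind s "h" = ((p.length + 1 + q2.length : Nat) : Int) := by
      rw [PySem.Str.rfind_eq, hsub, ← hl]
      show PySem.Chars.rfind.go l ['h'] l.length = _
      exact pvRfind_go l _ hL hAbove l.length hLlen
    -- assemble
    refine String.toList_inj.mp ?_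
    rw [String.toList_ofList, String.toList_append, String.toList_append,
        PySem.Str.toList_slice, PySem.Str.toList_slice, PySem.Str.toList_replace,
        PySem.Str.toList_slice, hsub, ← hl, hfirst, hlast]
    rw [show ("H" : String).toList = ['H'] from by decide]
    rw [show (p.length : Int) + 1 = ((p.length + 1 : Nat) : Int) from by push_cast; ring]
    simp only [PySem.Chars.slice]
    rw [PySem.List.slice_to_natCast, PySem.List.slice_natCast, PySem.List.slice_from_natCast]
    rw [show l.take (p.length + 1) = p ++ ['h'] from by
      rw [hdec, show p ++ 'h' :: (q2 ++ 'h' :: r) = (p ++ ['h']) ++ (q2 ++ 'h' :: r) by simp]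
      exact List.take_left' (by simp)]
    rw [show l.drop (p.length + 1) = q2 ++ 'h' :: r from by
      rw [hdec, show p ++ 'h' :: (q2 ++ 'h' :: r) = (p ++ ['h']) ++ (q2 ++ 'h' :: r) by simp]
      exact List.drop_left' (by simp)]
    rw [show p.length + 1 + q2.length - (p.length + 1) = q2.length from by omega]
    rw [show (q2 ++ 'h' :: r).take q2.length = q2 from List.take_left' rfl]
    rw [show l.drop (p.length + 1 + q2.length) = 'h' :: r from by
      rw [hdec, show p ++ 'h' :: (q2 ++ 'h' :: r) = (p ++ 'h' :: q2) ++ 'h' :: r by simp]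
      exact List.drop_left' (by simp; omega)]
    rw [pvReplace_char]
    rw [hA]
    simp
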